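-- pv_equiv track=rewrite | github.com/pypi-data/pypi-mirror-400 | packages/somaya/somaya-1.0.5-py3-none-any.whl/src/core/core_tokenizer.py | _frequency_based_split
-- ===== SOURCE A (Python) =====
-- def _len(s):
--     n = 0
--     for _ in s:
--         n += 1
--     return n
--
-- def _frequency_based_split(word):
--     """
--     Optimized frequency-based splitting using hash lookup
--     """
--     if _len(word) <= 2:
--         return [word]
--
--     # Use set for O(1) lookup instead of O(n) list search
--     common_patterns = {
--         "th", "he", "in", "er", "an", "re", "ed", "nd", "on", "en", "at", "ou",
--         "it", "is", "or", "ti", "as", "to", "be", "we", "ha", "hi", "do", "no",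
--         "if", "up", "my", "go", "me", "so", "us", "am", "by", "of"
--     }
--
--     result = []
--     i = 0
--     n = _len(word)
--
--     while i < n:
--         # Check 2-character patterns first (most common)
--         if i + 1 < n:
--             two_char = word[i:i+2]
--             if two_char in common_patterns:
--                 result.append(two_char)
--                 i += 2
--                 continue
--
--         # Single character
--         result.append(word[i])
--         i += 1
--
--     return result
-- ===== SOURCE B (Python) =====
-- _BIGRAMS = frozenset([
--     "th", "he", "in", "er", "an", "re", "ed", "nd", "on", "en", "at", "ou",
--     "it", "is", "or", "ti", "as", "to", "be", "we", "ha", "hi", "do", "no",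
--     "if", "up", "my", "go", "me", "so", "us", "am", "by", "of",
-- ])
--
-- def _frequency_based_split(word):
--     """Greedy bigram/char split, driven by a single character-stream pass
--     with a one-character pending buffer (no indices, no slicing)."""
--     if len(word) <= 2:
--         return [word]
--     out = []
--     pending = None
--     for c in word:
--         if pending is None:
--             pending = c
--         elif pending + c in _BIGRAMS:
--             out.append(pending + c)
--             pending = None
--         else:
--             out.append(pending)
--             pending = c
--     if pending is not None:
--         out.append(pending)
--     return out
-- ===== Notes on version B (the rewrite author's own statement) =====
-- stated objective: alternative
-- what changed: Replaces the index-advancing while loop with its slicing and repeated _len calls by a single for-pass over the characters driven by a one-character pending buffer (a 2-state automaton), with the bigram set hoisted to a module-level frozenset.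
import Mathlib
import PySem

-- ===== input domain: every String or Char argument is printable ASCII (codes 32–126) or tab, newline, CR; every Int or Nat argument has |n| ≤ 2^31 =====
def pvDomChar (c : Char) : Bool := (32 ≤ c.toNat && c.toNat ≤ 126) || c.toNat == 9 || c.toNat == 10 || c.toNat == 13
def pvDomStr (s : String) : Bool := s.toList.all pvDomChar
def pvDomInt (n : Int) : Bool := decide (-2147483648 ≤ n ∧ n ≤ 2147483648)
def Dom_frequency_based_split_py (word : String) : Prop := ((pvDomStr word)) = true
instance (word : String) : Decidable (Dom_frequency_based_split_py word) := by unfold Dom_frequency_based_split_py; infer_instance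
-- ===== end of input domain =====

-- B replaces A's index-advancing while loop (slices + hand-rolled _len) by one
-- for-pass over the characters with a one-character pending buffer (objective: alternative).

-- ===== PORT A =====
-- port of the helper _len (counts by iterating)
def pvLenA (s : String) : Int := s.toList.foldl (fun n _ => n + 1) 0

-- the set literal common_patterns (Python set → PySem.Set)
def pvCommonA : PySem.Set String := PySem.Set.ofList
  ["th", "he", "in", "er", "an", "re", "ed", "nd", "on", "en", "at", "ou",
   "it", "is", "or", "ti", "as", "to", "be", "we", "ha", "hi", "do", "no",
   "if", "up", "my", "go", "me", "so", "us", "am", "by", "of"]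

-- the while loop over index i, as the obvious structural recursion on the
-- remaining characters (word[i:i+2] = the next two chars; 'i+1 < n' = two remain)
def pvLoopA : List Char → List String
  | [] => []
  | [c] => [String.ofList [c]]
  | a :: b :: rest =>
      if PySem.Set.contains pvCommonA (String.ofList [a, b]) then
        String.ofList [a, b] :: pvLoopA rest
      else
        String.ofList [a] :: pvLoopA (b :: rest)

def frequency_based_split_py (word : String) : List String :=
  if pvLenA word ≤ 2 then [word]
  else pvLoopA word.toList

-- ===== PORT B =====
def pvBigramsB : PySem.Set String := PySem.Set.ofList
  ["th", "he", "in", "er", "an", "re", "ed", "nd", "on", "en", "at", "ou",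
   "it", "is", "or", "ti", "as", "to", "be", "we", "ha", "hi", "do", "no",
   "if", "up", "my", "go", "me", "so", "us", "am", "by", "of"]

-- body of B's single for-loop: state = (out, pending)
def pvStepB (st : List String × Option Char) (c : Char) : List String × Option Char :=
  match st.2 with
  | none => (st.1, some c)
  | some p =>
      if PySem.Set.contains pvBigramsB (String.ofList [p, c]) then
        (st.1 ++ [String.ofList [p, c]], none)
      else
        (st.1 ++ [String.ofList [p]], some c)

def frequency_based_split_py_alt (word : String) : List String :=
  if word.toList.length ≤ 2 then [word]
  else
    let st := word.toList.foldl pvStepB ([], none)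
    match st.2 with
    | none => st.1
    | some p => st.1 ++ [String.ofList [p]]

-- ===== PRECONDITION & SPEC =====
def Spec_frequency_based_split_py (word : String) (out : List String) : Prop := out = frequency_based_split_py_alt word
instance (word : String) (out : List String) : Decidable (Spec_frequency_based_split_py word out) := by unfold Spec_frequency_based_split_py; infer_instance

-- ===== CLAIM (what is proved, stated in full; the proofs are below) =====
def Claim_equal_frequency_based_split_py : Prop := ∀ (word : String), Dom_frequency_based_split_py word → Spec_frequency_based_split_py word (frequency_based_split_py word)

-- ===== LEMMAS AND PROOFS =====

-- what B's loop state denotes, given the characters still to come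
def pvFinish (pend : Option Char) (cs : List Char) : List String :=
  match pend with
  | none => pvLoopA cs
  | some p => pvLoopA (p :: cs)

theorem pvLen_eq (s : String) : pvLenA s = (s.toList.length : Int) := by
  unfold pvLenA
  induction s.toList with
  | nil => simp
  | cons a t ih =>
      simp only [List.foldl_cons, List.length_cons]
      have : ∀ (k : Int) (l : List Char), l.foldl (fun n _ => n + 1) k = k + l.length := by
        intro k l
        induction l generalizing k with
        | nil => simp
        | cons b u ih2 => simp [List.foldl_cons, ih2]; omega
      simp [this]; omega

theorem pvSetsEq : pvCommonA = pvBigramsB := rfl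

theorem pvFold_eq (cs : List Char) : ∀ (out : List String) (pend : Option Char),
    (let st := cs.foldl pvStepB (out, pend);
     match st.2 with
     | none => st.1
     | some p => st.1 ++ [String.ofList [p]]) = out ++ pvFinish pend cs := by
  induction cs with
  | nil =>
      intro out pend
      cases pend <;> simp [pvFinish, pvLoopA]
  | cons c rest ih =>
      intro out pend
      cases pend with
      | none =>
          simpa [List.foldl_cons, pvStepB, pvFinish] using ih out (some c)
      | some p =>
          simp only [List.foldl_cons, pvStepB]
          by_cases h : PySem.Set.contains pvBigramsB (String.ofList [p, c]) = true
          · rw [if_pos h, ih (out ++ [String.ofList [p, c]]) none]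
            have h' : PySem.Set.contains pvCommonA (String.ofList [p, c]) = true := by
              rw [pvSetsEq]; exact h
            have hm : String.ofList [p, c] ∈ pvCommonA := by simpa using h'
            simp [pvFinish, pvLoopA, hm]
          · rw [if_neg h, ih (out ++ [String.ofList [p]]) (some c)]
            have h' : ¬ PySem.Set.contains pvCommonA (String.ofList [p, c]) = true := by
              rw [pvSetsEq]; exact h
            have hm : String.ofList [p, c] ∉ pvCommonA := by simpa using h'
            simp [pvFinish, pvLoopA, hm]

-- ===== VERDICT (by name: the statement is the Claim_ definition above) =====
theorem frequency_based_split_py_spec : Claim_equal_frequency_based_split_py := by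
  intro word _
  unfold Spec_frequency_based_split_py frequency_based_split_py frequency_based_split_py_alt
  have hlen : pvLenA word = (word.toList.length : Int) := pvLen_eq word
  by_cases h : word.toList.length ≤ 2
  · rw [if_pos (by rw [hlen]; exact_mod_cast h), if_pos h]
  · rw [if_neg (by rw [hlen]; exact_mod_cast h), if_neg h]
    have := pvFold_eq word.toList [] none
    simpa [pvFinish] using this.symm
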